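-- pv_equiv track=rewrite | github.com/WocherZ/Project-Alice | print_timetable.py | split_time
-- ===== SOURCE A (Python) =====
-- def split_time(time_str):
--     t1 = []
--     t2 = []
--     check = True
--     for i in time_str:
--         if i == ":":
--             check = False
--         elif check:
--             t1.append(i)
--         elif check is False:
--             t2.append(i)
--     return ["".join(t1), "".join(t2)]
-- ===== SOURCE B (Python) =====
-- def split_time(time_str):
--     parts = time_str.split(":")
--     return [parts[0], "".join(parts[1:])]
-- ===== Notes on version B (the rewrite author's own statement) =====
-- stated objective: idiomatic
-- what changed: Replaces the character-by-character loop with a boolean flag and two accumulators by a single C-level str.split(':') plus joining the tail segments, which reproduces the before-first-colon / colons-removed-after split.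
import Mathlib
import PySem

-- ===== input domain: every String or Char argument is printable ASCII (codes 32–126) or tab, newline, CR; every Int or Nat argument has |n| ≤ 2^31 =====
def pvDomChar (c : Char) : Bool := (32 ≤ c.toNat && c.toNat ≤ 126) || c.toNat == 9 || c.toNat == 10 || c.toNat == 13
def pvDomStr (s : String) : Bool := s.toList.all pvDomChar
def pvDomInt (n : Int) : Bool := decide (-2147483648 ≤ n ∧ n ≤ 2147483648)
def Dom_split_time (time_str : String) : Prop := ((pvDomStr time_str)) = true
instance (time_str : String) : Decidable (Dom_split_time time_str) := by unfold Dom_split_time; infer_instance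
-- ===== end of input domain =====

-- B replaces A's char loop (flag + two accumulators) by str.split(':') plus joining the tail segments (idiomatic).

-- ===== PORT A =====
-- the loop's state is (t1, t2, check); "".join over single characters is String.ofList
def split_time (time_str : String) : List String :=
  let st := time_str.toList.foldl
    (fun (s : List Char × List Char × Bool) i =>
      if i = ':' then (s.1, s.2.1, false)
      else if s.2.2 then (s.1 ++ [i], s.2.1, s.2.2)
      else if s.2.2 = false then (s.1, s.2.1 ++ [i], s.2.2)
      else s)
    ([], [], true)
  [String.ofList st.1, String.ofList st.2.1]

-- ===== PORT B =====
-- parts = time_str.split(":") (nonempty sep: PySem.Chars.splitOn); parts[0] (split always returns ≥ 1 part); "".join(parts[1:])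
def split_time_alt (time_str : String) : List String :=
  let parts := PySem.Chars.splitOn time_str.toList [':']
  [String.ofList (parts.headD []), String.ofList (PySem.Chars.join [] (parts.drop 1))]

-- ===== PRECONDITION & SPEC =====
def Spec_split_time (time_str : String) (out : List String) : Prop := out = split_time_alt time_str
instance (time_str : String) (out : List String) : Decidable (Spec_split_time time_str out) := by unfold Spec_split_time; infer_instance

-- ===== CLAIM (what is proved, stated in full; the proofs are below) =====
def Claim_equal_split_time : Prop := ∀ (time_str : String), Dom_split_time time_str → Spec_split_time time_str (split_time time_str)

-- ===== LEMMAS AND PROOFS =====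

def mySplit (c : Char) : List Char → List (List Char)
  | [] => [[]]
  | a :: rest => if a = c then [] :: mySplit c rest else (mySplit c rest).modifyHead (a :: ·)

theorem go_spec (c : Char) (fuel : Nat) (l cur : List Char) (acc' : List (List Char))
    (h : l.length < fuel) :
    PySem.Chars.splitOn.go [c] fuel l cur acc' =
      acc'.reverse ++ (mySplit c l).modifyHead (cur.reverse ++ ·) := by
  induction fuel generalizing l cur acc' with
  | zero => omega
  | succ f ih =>
    cases l with
    | nil => simp [PySem.Chars.splitOn.go, mySplit]
    | cons a rest =>
      rw [PySem.Chars.splitOn.go]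
      by_cases hac : a = c
      · subst hac
        simp only [List.isPrefixOf, BEq.rfl, Bool.true_and, if_true,
          List.length_cons, List.length_nil, List.drop_succ_cons, List.drop_zero]
        rw [ih rest [] (cur.reverse :: acc') (by simpa using Nat.lt_of_succ_lt_succ h)]
        simp [mySplit, List.modifyHead]
        cases mySplit a rest <;> simp
      · have : ([c].isPrefixOf (a :: rest)) = false := by
          simp [List.isPrefixOf]; exact fun hh => absurd hh.symm hac
        rw [this]
        simp only [if_false, Bool.false_eq_true]
        rw [ih rest (a :: cur) acc' (by simpa using Nat.lt_of_succ_lt_succ h)]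
        simp [mySplit, hac]
        cases mySplit c rest <;> simp

theorem mySplit_ne_nil (c : Char) (l : List Char) : mySplit c l ≠ [] := by
  induction l with
  | nil => simp [mySplit]
  | cons a rest ih =>
    unfold mySplit; split
    · simp
    · cases hm : mySplit c rest with
      | nil => exact absurd hm ih
      | cons x xs => simp [List.modifyHead]

theorem splitOn_eq_mySplit (c : Char) (l : List Char) :
    PySem.Chars.splitOn l [c] = mySplit c l := by
  rw [PySem.Chars.splitOn, go_spec c _ l [] [] (by omega)]
  cases h : mySplit c l with
  | nil => exact absurd h (mySplit_ne_nil c l)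
  | cons x xs => simp

theorem headD_mySplit (c : Char) (l : List Char) :
    (mySplit c l).headD [] = l.takeWhile (· ≠ c) := by
  induction l with
  | nil => simp [mySplit]
  | cons a rest ih =>
    unfold mySplit
    by_cases h : a = c
    · simp [h, List.takeWhile]
    · simp only [if_neg h, List.takeWhile_cons, decide_eq_true_eq]
      rw [if_pos h]
      cases hm : mySplit c rest with
      | nil => exact absurd hm (mySplit_ne_nil c rest)
      | cons x xs => simp at ih ⊢; rw [hm] at ih; simpa using ih

theorem intercalate_nil_left {α : Type} (xs : List (List α)) :
    List.intercalate ([] : List α) xs = xs.flatten := by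
  induction xs with
  | nil => simp [List.intercalate]
  | cons x xs ih =>
    cases xs with
    | nil => simp [List.intercalate]
    | cons y t =>
      simp [List.intercalate, List.intersperse] at ih ⊢
      simpa using ih

theorem flatten_mySplit (c : Char) (l : List Char) :
    (mySplit c l).flatten = l.filter (· ≠ c) := by
  induction l with
  | nil => simp [mySplit]
  | cons a rest ih =>
    unfold mySplit
    by_cases h : a = c
    · simpa [h] using ih
    · cases hm : mySplit c rest with
      | nil => exact absurd hm (mySplit_ne_nil c rest)
      | cons x xs => rw [hm] at ih; simpa [h] using ih

theorem join_tail_mySplit (c : Char) (l : List Char) :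
    PySem.Chars.join [] ((mySplit c l).drop 1) =
      ((l.dropWhile (· ≠ c)).drop 1).filter (· ≠ c) := by
  rw [PySem.Chars.join, intercalate_nil_left]
  induction l with
  | nil => simp [mySplit]
  | cons a rest ih =>
    unfold mySplit
    by_cases h : a = c
    · simp [h, List.dropWhile, flatten_mySplit]
    · cases hm : mySplit c rest with
      | nil => exact absurd hm (mySplit_ne_nil c rest)
      | cons x xs => rw [hm] at ih; simpa [h, List.dropWhile] using ih

theorem foldA_false (l t1 t2 : List Char) :
    l.foldl (fun (s : List Char × List Char × Bool) i =>
      if i = ':' then (s.1, s.2.1, false)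
      else if s.2.2 then (s.1 ++ [i], s.2.1, s.2.2)
      else if s.2.2 = false then (s.1, s.2.1 ++ [i], s.2.2)
      else s) (t1, t2, false) =
    (t1, t2 ++ l.filter (· ≠ ':'), false) := by
  induction l generalizing t2 with
  | nil => simp
  | cons a rest ih =>
    by_cases h : a = ':'
    · simp [List.foldl_cons, h, ih]
    · simp [List.foldl_cons, h, ih]

theorem foldA_true (l t1 t2 : List Char) :
    ((l.foldl (fun (s : List Char × List Char × Bool) i =>
      if i = ':' then (s.1, s.2.1, false)
      else if s.2.2 then (s.1 ++ [i], s.2.1, s.2.2)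
      else if s.2.2 = false then (s.1, s.2.1 ++ [i], s.2.2)
      else s) (t1, t2, true)).1,
     (l.foldl (fun (s : List Char × List Char × Bool) i =>
      if i = ':' then (s.1, s.2.1, false)
      else if s.2.2 then (s.1 ++ [i], s.2.1, s.2.2)
      else if s.2.2 = false then (s.1, s.2.1 ++ [i], s.2.2)
      else s) (t1, t2, true)).2.1) =
    (t1 ++ l.takeWhile (· ≠ ':'),
     t2 ++ ((l.dropWhile (· ≠ ':')).drop 1).filter (· ≠ ':')) := by
  induction l generalizing t1 with
  | nil => simp
  | cons a rest ih =>
    by_cases h : a = ':'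
    · simp [List.foldl_cons, h, foldA_false, List.takeWhile, List.dropWhile]
    · simp only [List.foldl_cons, if_neg h, if_pos rfl]
      simp [ih, h]

theorem split_time_agree (s : String) : split_time s = split_time_alt s := by
  have hA := foldA_true s.toList [] []
  have h1 := congrArg Prod.fst hA
  have h2 := congrArg Prod.snd hA
  simp only at h1 h2
  simp only [split_time, split_time_alt, splitOn_eq_mySplit, headD_mySplit, join_tail_mySplit,
    h1, h2, List.nil_append]

-- ===== VERDICT (by name: the statement is the Claim_ definition above) =====
theorem split_time_spec : Claim_equal_split_time := by
  intro s _
  unfold Spec_split_time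
  exact split_time_agree s
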